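-- pv_equiv track=rewrite | github.com/bwdnr95/tono-operation | backend/app/services/airbnb_guest_message_extractor.py | _last_non_empty_block
-- ===== SOURCE A (Python) =====
-- from typing import Optional
--
-- def _last_non_empty_block(text: str) -> Optional[str]:
--     """
--     텍스트를 줄 단위로 나눈 뒤,
--     마지막 '연속된 non-empty 줄 묶음'을 하나의 블록으로 잡아서 반환.
--     """
--     lines = text.split("\n")
--
--     blocks: list[list[str]] = []
--     current: list[str] = []
--
--     for raw in lines:
--         line = raw.rstrip("\n")
--         if line.strip():
--             current.append(line)
--         else:
--             if current:
--                 blocks.append(current)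
--                 current = []
--
--     if current:
--         blocks.append(current)
--
--     if not blocks:
--         return None
--
--     candidate = blocks[-1]
--     candidate = [l.strip() for l in candidate]
--     return "\n".join(candidate).strip() or None
-- ===== SOURCE B (Python) =====
-- from typing import Optional
--
--
-- def _last_non_empty_block(text: str) -> Optional[str]:
--     block_rev: list[str] = []
--     for line in reversed(text.split("\n")):
--         s = line.strip()
--         if s:
--             block_rev.append(s)
--         elif block_rev:
--             break
--     if not block_rev:
--         return None
--     return "\n".join(reversed(block_rev))
-- ===== Notes on version B (the rewrite author's own statement) =====
-- stated objective: alternative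
-- what changed: A scans forward over all lines grouping every maximal run of non-empty lines into a blocks list and then takes blocks[-1]; B scans the lines once in reverse, skips trailing blank lines, collects the last run of non-empty lines and stops at the first blank line below it, never materialising the other blocks.
import Mathlib
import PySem

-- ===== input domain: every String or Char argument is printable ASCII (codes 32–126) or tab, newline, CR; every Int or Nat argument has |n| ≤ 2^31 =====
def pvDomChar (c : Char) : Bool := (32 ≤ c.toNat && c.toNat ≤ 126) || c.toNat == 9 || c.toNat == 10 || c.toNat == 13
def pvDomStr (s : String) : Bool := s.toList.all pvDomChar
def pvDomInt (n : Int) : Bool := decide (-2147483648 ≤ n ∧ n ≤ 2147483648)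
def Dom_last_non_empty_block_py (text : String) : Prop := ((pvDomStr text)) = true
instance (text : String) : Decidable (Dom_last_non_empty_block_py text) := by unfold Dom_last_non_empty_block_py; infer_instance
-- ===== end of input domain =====

-- B replaces A's forward scan that groups ALL non-empty-line blocks by a single reverse scan
-- that stops at the first blank line below the last block (objective: alternative decomposition).

-- ===== PORT A =====
-- raw.rstrip("\n"): PySem has no rstrip-with-chars primitive; exact hand port
-- (drop exactly the trailing '\n' characters, as Python's str.rstrip("\n") does).
def pvRstripNl (s : String) : String :=
  String.ofList ((s.toList.reverse.dropWhile (fun c => c == '\n')).reverse)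

-- the 'for raw in lines' loop, state = (blocks, current)
def pvALoop : List String → List (List String) → List String → List (List String) × List String
  | [], blocks, current => (blocks, current)
  | raw :: rest, blocks, current =>
    let line := pvRstripNl raw
    if PySem.Str.strip line ≠ "" then pvALoop rest blocks (current ++ [line])
    else if current ≠ [] then pvALoop rest (blocks ++ [current]) []
    else pvALoop rest blocks current

-- everything after 'lines = text.split("\n")'
def pvAFinish (lines : List String) : Option String :=
  let res := pvALoop lines [] []
  let blocks := if res.2 ≠ [] then res.1 ++ [res.2] else res.1
  if blocks = [] then none
  else
    match PySem.List.pyGet? blocks (-1) with   -- blocks[-1]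
    | none => none                              -- unreachable: blocks ≠ []
    | some cand =>
      let cand := cand.map PySem.Str.strip
      let joined := PySem.Str.strip (PySem.Str.join "\n" cand)
      if joined ≠ "" then some joined else none -- '… or None'

def last_non_empty_block_py (text : String) : Option String :=
  pvAFinish ((PySem.Str.split? text "\n").getD [])   -- split? is always some: sep "\n" ≠ ""

-- ===== PORT B =====
-- the 'for line in reversed(...)' loop with its early break, state = block_rev
def pvBLoop : List String → List String → List String
  | [], blockRev => blockRev
  | line :: rest, blockRev =>
    let s := PySem.Str.strip line
    if s ≠ "" then pvBLoop rest (blockRev ++ [s])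
    else if blockRev ≠ [] then blockRev          -- break
    else pvBLoop rest blockRev

def pvBFinish (lines : List String) : Option String :=
  let blockRev := pvBLoop lines.reverse []
  if blockRev = [] then none
  else some (PySem.Str.join "\n" blockRev.reverse)

def last_non_empty_block_py_alt (text : String) : Option String :=
  pvBFinish ((PySem.Str.split? text "\n").getD [])

-- ===== PRECONDITION & SPEC =====
def Spec_last_non_empty_block_py (text : String) (out : Option String) : Prop := out = last_non_empty_block_py_alt text
instance (text : String) (out : Option String) : Decidable (Spec_last_non_empty_block_py text out) := by unfold Spec_last_non_empty_block_py; infer_instance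

-- ===== CLAIM (what is proved, stated in full; the proofs are below) =====
def Claim_equal_last_non_empty_block_py : Prop := ∀ (text : String), Dom_last_non_empty_block_py text → Spec_last_non_empty_block_py text (last_non_empty_block_py text)

-- ===== LEMMAS AND PROOFS =====

-- the line test both programs branch on
def pvQ (s : String) : Bool := PySem.Str.strip s != ""

-- one iteration of A's loop
def pvStepA (x : String) (bc : List (List String) × List String) : List (List String) × List String :=
  if PySem.Str.strip (pvRstripNl x) ≠ "" then (bc.1, bc.2 ++ [pvRstripNl x])
  else if bc.2 ≠ [] then (bc.1 ++ [bc.2], []) else bc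

lemma strip_append_space (xs : List Char) (c : Char) (hc : PySem.Chars.isspace c = true) :
    PySem.Chars.strip (xs ++ [c]) = PySem.Chars.strip xs := by
  unfold PySem.Chars.strip PySem.Chars.lstrip PySem.Chars.rstrip
  rw [List.dropWhile_append]
  by_cases h : List.dropWhile PySem.Chars.isspace xs = []
  · simp [h, hc]
  · simp [List.isEmpty_iff, h, hc, List.dropWhile_cons]

lemma strip_rev_dropWhile (p : Char → Bool) (hp : ∀ c, p c = true → PySem.Chars.isspace c = true) :
    ∀ r : List Char, PySem.Chars.strip (List.dropWhile p r).reverse = PySem.Chars.strip r.reverse := by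
  intro r
  induction r with
  | nil => rfl
  | cons a t ih =>
    by_cases ha : p a = true
    · rw [List.dropWhile_cons_of_pos ha, ih, List.reverse_cons,
        strip_append_space t.reverse a (hp a ha)]
    · rw [List.dropWhile_cons_of_neg (by simp [ha])]

lemma strip_rstripNl (s : String) : PySem.Str.strip (pvRstripNl s) = PySem.Str.strip s := by
  rw [← String.toList_inj, PySem.Str.toList_strip, PySem.Str.toList_strip]
  have h : (pvRstripNl s).toList = (s.toList.reverse.dropWhile (fun c => c == '\n')).reverse := by
    simp [pvRstripNl]
  rw [h]
  have hp : ∀ c : Char, (c == '\n') = true → PySem.Chars.isspace c = true := by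
    intro c hc
    have : c = '\n' := by simpa using hc
    subst this; decide
  have := strip_rev_dropWhile (fun c => c == '\n') hp s.toList.reverse
  simpa using this

lemma join_cons_exists (sep e : List Char) (rest : List (List Char)) :
    ∃ w, PySem.Chars.join sep (e :: rest) = e ++ w := by
  cases rest with
  | nil => exact ⟨[], by simp [PySem.Chars.join, List.intercalate]⟩
  | cons b l =>
    exact ⟨sep ++ PySem.Chars.join sep (b :: l),
      by simp [PySem.Chars.join, List.intercalate, List.intersperse]⟩

lemma join_concat_exists (sep e : List Char) (init : List (List Char)) :
    ∃ w, PySem.Chars.join sep (init ++ [e]) = w ++ e := by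
  induction init with
  | nil => exact ⟨[], by simp [PySem.Chars.join, List.intercalate]⟩
  | cons a t ih =>
    obtain ⟨w, hw⟩ := ih
    have hstep : PySem.Chars.join sep ((a :: t) ++ [e]) = a ++ sep ++ PySem.Chars.join sep (t ++ [e]) := by
      rw [List.cons_append]
      cases ht : t ++ [e] with
      | nil => exact absurd ht (by simp)
      | cons b l => simp [PySem.Chars.join, List.intercalate, List.intersperse]
    exact ⟨a ++ sep ++ w, by rw [hstep, hw]; simp⟩

lemma strip_head_not_space (z : List Char) (h : PySem.Chars.strip z ≠ []) :
    ∃ c t, PySem.Chars.strip z = c :: t ∧ PySem.Chars.isspace c = false := by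
  have hsz : PySem.Chars.strip z = PySem.Chars.rstrip (List.dropWhile PySem.Chars.isspace z) := rfl
  have hsuf : (PySem.Chars.strip z).reverse <:+ (List.dropWhile PySem.Chars.isspace z).reverse := by
    rw [hsz]
    unfold PySem.Chars.rstrip
    rw [List.reverse_reverse]
    exact List.dropWhile_suffix _
  have hpre : PySem.Chars.strip z <+: List.dropWhile PySem.Chars.isspace z := by
    rw [← List.reverse_suffix]; exact hsuf
  obtain ⟨t', ht'⟩ := hpre
  obtain ⟨c, tl, hct⟩ : ∃ c tl, PySem.Chars.strip z = c :: tl := by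
    cases he : PySem.Chars.strip z with
    | nil => exact absurd he h
    | cons c tl => exact ⟨c, tl, rfl⟩
  have hune : List.dropWhile PySem.Chars.isspace z ≠ [] := by
    rw [← ht', hct]; simp
  have hhead := List.head_dropWhile_not PySem.Chars.isspace hune
  have hcons : List.dropWhile PySem.Chars.isspace z = c :: (tl ++ t') := by
    rw [← ht', hct]; simp
  have hh : (List.dropWhile PySem.Chars.isspace z).head hune = c := by
    simp [hcons]
  rw [hh] at hhead
  exact ⟨c, tl, hct, hhead⟩

lemma strip_last_not_space (z : List Char) (h : PySem.Chars.strip z ≠ []) :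
    ∃ w c, PySem.Chars.strip z = w ++ [c] ∧ PySem.Chars.isspace c = false := by
  have hrev : (PySem.Chars.strip z).reverse
      = List.dropWhile PySem.Chars.isspace (PySem.Chars.lstrip z).reverse := by
    unfold PySem.Chars.strip PySem.Chars.rstrip
    rw [List.reverse_reverse]
  obtain ⟨c, tl, hct⟩ : ∃ c tl, (PySem.Chars.strip z).reverse = c :: tl := by
    cases he : (PySem.Chars.strip z).reverse with
    | nil => exact absurd (by simpa using he) h
    | cons c tl => exact ⟨c, tl, rfl⟩
  have hne2 : List.dropWhile PySem.Chars.isspace (PySem.Chars.lstrip z).reverse ≠ [] := by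
    rw [← hrev, hct]; simp
  have hhead := List.head_dropWhile_not PySem.Chars.isspace hne2
  have hh : (List.dropWhile PySem.Chars.isspace (PySem.Chars.lstrip z).reverse).head hne2 = c := by
    have := hrev.symm.trans hct
    simp [this]
  rw [hh] at hhead
  refine ⟨tl.reverse, c, ?_, hhead⟩
  have := congrArg List.reverse hct
  simpa using this

lemma strip_join_self (lst : List (List Char)) (hne : lst ≠ [])
    (h : ∀ e ∈ lst, ∃ z, e = PySem.Chars.strip z ∧ e ≠ []) :
    PySem.Chars.strip (PySem.Chars.join ['\n'] lst) = PySem.Chars.join ['\n'] lst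
      ∧ PySem.Chars.join ['\n'] lst ≠ [] := by
  obtain ⟨e, rest, rfl⟩ : ∃ e rest, lst = e :: rest := by
    cases lst with
    | nil => exact absurd rfl hne
    | cons e rest => exact ⟨e, rest, rfl⟩
  obtain ⟨z, hez, hene⟩ := h e (by simp)
  obtain ⟨c, t, hct, hc⟩ := strip_head_not_space z (by rw [← hez]; exact hene)
  obtain ⟨w, hw⟩ := join_cons_exists ['\n'] e rest
  have hj : PySem.Chars.join ['\n'] (e :: rest) = c :: (t ++ w) := by
    rw [hw, hez, hct]; simp
  refine ⟨?_, by rw [hj]; simp⟩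
  have hl : PySem.Chars.lstrip (PySem.Chars.join ['\n'] (e :: rest))
      = PySem.Chars.join ['\n'] (e :: rest) := by
    rw [hj]
    unfold PySem.Chars.lstrip
    rw [List.dropWhile_cons_of_neg (by simp [hc])]
  have hlast := List.dropLast_append_getLast (l := e :: rest) (by simp)
  obtain ⟨z2, hez2, hene2⟩ := h ((e :: rest).getLast (by simp)) (List.getLast_mem _)
  obtain ⟨w2, c2, hwc2, hc2⟩ := strip_last_not_space z2 (by rw [← hez2]; exact hene2)
  obtain ⟨w3, hw3⟩ := join_concat_exists ['\n'] ((e :: rest).getLast (by simp)) (e :: rest).dropLast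
  have hj2 : PySem.Chars.join ['\n'] (e :: rest) = (w3 ++ w2) ++ [c2] := by
    conv_lhs => rw [← hlast]
    rw [hw3, hez2, hwc2, List.append_assoc]
  have hr : PySem.Chars.rstrip (PySem.Chars.join ['\n'] (e :: rest))
      = PySem.Chars.join ['\n'] (e :: rest) := by
    rw [hj2]
    unfold PySem.Chars.rstrip
    rw [List.reverse_append]
    simp [hc2]
  show PySem.Chars.rstrip (PySem.Chars.lstrip _) = _
  rw [hl, hr]

lemma str_strip_join_self (lst : List String) (hne : lst ≠ [])
    (h : ∀ e ∈ lst, (∃ z, e = PySem.Str.strip z) ∧ e ≠ "") :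
    PySem.Str.strip (PySem.Str.join "\n" lst) = PySem.Str.join "\n" lst
      ∧ PySem.Str.join "\n" lst ≠ "" := by
  have hl : lst.map String.toList ≠ [] := by simpa using hne
  have hmem : ∀ e ∈ lst.map String.toList, ∃ z, e = PySem.Chars.strip z ∧ e ≠ [] := by
    intro e he
    obtain ⟨e', he', rfl⟩ := List.mem_map.mp he
    obtain ⟨⟨z, hz⟩, hne'⟩ := h e' he'
    refine ⟨z.toList, by rw [hz, PySem.Str.toList_strip], ?_⟩
    intro h0
    exact hne' (String.toList_inj.mp (by rw [h0]; rfl))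
  have key := strip_join_self (lst.map String.toList) hl hmem
  have hnl : ("\n" : String).toList = ['\n'] := rfl
  constructor
  · rw [← String.toList_inj, PySem.Str.toList_strip, PySem.Str.toList_join, hnl]
    exact key.1
  · intro h0
    apply key.2
    have := congrArg String.toList h0
    rw [PySem.Str.toList_join, hnl] at this
    simpa using this

lemma pyGet_neg_one_concat {α : Type} (l : List α) (a : α) :
    PySem.List.pyGet? (l ++ [a]) (-1) = some a := by
  simp [PySem.List.pyGet?, PySem.List.pyIdx?]

lemma pvALoop_append (L : List String) (x : String) :
    ∀ b c, pvALoop (L ++ [x]) b c = pvStepA x (pvALoop L b c) := by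
  induction L with
  | nil =>
    intro b c
    by_cases h1 : PySem.Str.strip (pvRstripNl x) = ""
    · by_cases h2 : c = [] <;> simp [pvALoop, pvStepA, h1, h2]
    · simp [pvALoop, pvStepA, h1]
  | cons raw rest ih =>
    intro b c
    by_cases h1 : PySem.Str.strip (pvRstripNl raw) = ""
    · by_cases h2 : c = [] <;> simp [pvALoop, h1, h2, ih]
    · simp [pvALoop, h1, ih]

lemma pvALoop_snd (L : List String) :
    (pvALoop L [] []).2 = ((L.reverse.takeWhile pvQ).map pvRstripNl).reverse := by
  induction L using List.reverseRecOn with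
  | nil => rfl
  | append_singleton L x ih =>
    rw [pvALoop_append]
    by_cases hx : PySem.Str.strip x = ""
    · have hx' : PySem.Str.strip (pvRstripNl x) = "" := by rw [strip_rstripNl]; exact hx
      simp only [pvStepA, hx', ne_eq, not_true_eq_false, if_false, List.reverse_append]
      have hq : pvQ x = false := by simp [pvQ, hx]
      simp [hq]
      split_ifs with h <;> simp [h]
    · have hx' : PySem.Str.strip (pvRstripNl x) ≠ "" := by rw [strip_rstripNl]; exact hx
      have hq : pvQ x = true := by simp [pvQ, hx]
      simp [pvStepA, hx', hq, ih]

lemma pvBLoop_run (r : List String) :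
    ∀ acc, acc ≠ [] → pvBLoop r acc = acc ++ (r.takeWhile pvQ).map PySem.Str.strip := by
  induction r with
  | nil => intro acc _; simp [pvBLoop]
  | cons line rest ih =>
    intro acc hacc
    by_cases hs : PySem.Str.strip line = ""
    · have hq : pvQ line = false := by simp [pvQ, hs]
      simp [pvBLoop, hs, hacc, hq]
    · have hq : pvQ line = true := by simp [pvQ, hs]
      rw [List.takeWhile_cons]
      simp only [pvBLoop, hs, ne_eq, not_false_eq_true, if_true, hq]
      rw [ih (acc ++ [PySem.Str.strip line]) (by simp)]
      simp

lemma finish_eq (L : List String) : pvAFinish L = pvBFinish L := by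
  induction L using List.reverseRecOn with
  | nil => rfl
  | append_singleton L x ih =>
    by_cases hx : PySem.Str.strip x = ""
    · have hx' : PySem.Str.strip (pvRstripNl x) = "" := by rw [strip_rstripNl]; exact hx
      have hA : pvAFinish (L ++ [x]) = pvAFinish L := by
        unfold pvAFinish
        rw [pvALoop_append]
        rcases hP : pvALoop L [] [] with ⟨b1, c1⟩
        by_cases hc : c1 = []
        · simp [pvStepA, hx', hc]
        · simp [pvStepA, hx', hc]
      have hB : pvBFinish (L ++ [x]) = pvBFinish L := by
        unfold pvBFinish
        rw [List.reverse_append]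
        simp [pvBLoop, hx]
      rw [hA, hB, ih]
    · have hx' : PySem.Str.strip (pvRstripNl x) ≠ "" := by rw [strip_rstripNl]; exact hx
      have hmapstrip : ((L.reverse.takeWhile pvQ).map pvRstripNl).map PySem.Str.strip
          = (L.reverse.takeWhile pvQ).map PySem.Str.strip := by
        rw [List.map_map]
        exact List.map_congr_left (fun a _ => strip_rstripNl a)
      have hA : pvAFinish (L ++ [x])
          = some (PySem.Str.join "\n"
              (((L.reverse.takeWhile pvQ).map PySem.Str.strip).reverse ++ [PySem.Str.strip x])) := by
        unfold pvAFinish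
        have e1 : pvALoop (L ++ [x]) [] []
            = ((pvALoop L [] []).1,
               ((L.reverse.takeWhile pvQ).map pvRstripNl).reverse ++ [pvRstripNl x]) := by
          rw [pvALoop_append]
          rcases hP : pvALoop L [] [] with ⟨b1, c1⟩
          have hc1 : c1 = ((L.reverse.takeWhile pvQ).map pvRstripNl).reverse := by
            have := pvALoop_snd L
            rw [hP] at this
            exact this
          simp [pvStepA, hx', hc1]
        rw [e1]
        simp only [ne_eq, ite_not]
        rw [if_neg (by simp : ¬((List.map pvRstripNl (List.takeWhile pvQ L.reverse)).reverse ++ [pvRstripNl x] = []))]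
        rw [if_neg (by simp)]
        rw [pyGet_neg_one_concat]
        have hlst : (((L.reverse.takeWhile pvQ).map pvRstripNl).reverse ++ [pvRstripNl x]).map PySem.Str.strip
            = ((L.reverse.takeWhile pvQ).map PySem.Str.strip).reverse ++ [PySem.Str.strip x] := by
          rw [List.map_append, List.map_reverse, hmapstrip, List.map_singleton, strip_rstripNl]
        have hjoin := str_strip_join_self
          (((L.reverse.takeWhile pvQ).map PySem.Str.strip).reverse ++ [PySem.Str.strip x])
          (by simp)
          (by
            intro e he
            rcases List.mem_append.mp he with h1 | h1
            · obtain ⟨a, ha, rfl⟩ := List.mem_map.mp (List.mem_reverse.mp h1)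
              have hqa : pvQ a = true := List.mem_takeWhile_imp ha
              have : PySem.Str.strip a ≠ "" := by simpa [pvQ] using hqa
              exact ⟨⟨a, rfl⟩, this⟩
            · have : e = PySem.Str.strip x := by simpa using h1
              subst this
              exact ⟨⟨x, rfl⟩, hx⟩)
        simp [hlst, hjoin.1, hjoin.2]
      have hB : pvBFinish (L ++ [x])
          = some (PySem.Str.join "\n"
              (((L.reverse.takeWhile pvQ).map PySem.Str.strip).reverse ++ [PySem.Str.strip x])) := by
        unfold pvBFinish
        rw [List.reverse_append]
        have e2 : pvBLoop ([x].reverse ++ L.reverse) []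
            = [PySem.Str.strip x] ++ (L.reverse.takeWhile pvQ).map PySem.Str.strip := by
          simp only [List.reverse_cons, List.reverse_nil, List.nil_append, List.singleton_append]
          show pvBLoop (x :: L.reverse) [] = _
          simp only [pvBLoop, hx, ne_eq, not_false_eq_true, if_true, List.nil_append]
          exact pvBLoop_run L.reverse [PySem.Str.strip x] (by simp)
        rw [e2]
        simp
      rw [hA, hB]

-- ===== VERDICT (by name: the statement is the Claim_ definition above) =====
theorem last_non_empty_block_py_spec : Claim_equal_last_non_empty_block_py := by
  intro text _
  unfold Spec_last_non_empty_block_py last_non_empty_block_py last_non_empty_block_py_alt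
  exact finish_eq _
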